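-- pv_equiv track=rewrite | github.com/bastodian/NichePy | nichefunc.py | get_original_pair
-- ===== SOURCE A (Python) =====
-- def get_original_pair(writedictionary):
--     '''
--         This is a function for retrieving the names for the original pair.
--         This information is stored in a dictionary called originaldictionary:
--
--         {model: pair}
--
--         input: writedictionary (a dicttionary of metric values for all pairs: {model:{metric:{(pair): metric value}}})
--     '''
--     originaldictionary={}
--
--     for model in writedictionary.keys():
--         myindex = list(writedictionary[model].keys())[0]
--         mylist = list(writedictionary[model][myindex].keys())
--         for thispair in mylist:
--             mypair = (thispair[0].split('_'),thispair[1].split('_'))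
--             if not mypair[1][len(mypair[1])-1].isdigit():
--                 originaldictionary[model] = thispair
--
--     return originaldictionary
-- ===== SOURCE B (Python) =====
-- def _last_original(pairs):
--     # first qualifying pair scanning from the end == A's "last forward match wins"
--     for p in reversed(pairs):
--         if not p[1].split('_')[-1].isdigit():
--             return p
--     return None
--
-- def get_original_pair(writedictionary):
--     result = {}
--     for model, metrics in writedictionary.items():
--         pairs = list(metrics[list(metrics)[0]])
--         found = _last_original(pairs)
--         if found is not None:
--             result[model] = found
--     return result
-- ===== Notes on version B (the rewrite author's own statement) =====
-- stated objective: alternative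
-- what changed: Per model, A's inner loop overwrites the dictionary entry on every qualifying pair so the last match wins; B instead delegates to a helper that scans the pair list in reverse and returns the first qualifying pair (early return) or None, inserting at most once.
import Mathlib
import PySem

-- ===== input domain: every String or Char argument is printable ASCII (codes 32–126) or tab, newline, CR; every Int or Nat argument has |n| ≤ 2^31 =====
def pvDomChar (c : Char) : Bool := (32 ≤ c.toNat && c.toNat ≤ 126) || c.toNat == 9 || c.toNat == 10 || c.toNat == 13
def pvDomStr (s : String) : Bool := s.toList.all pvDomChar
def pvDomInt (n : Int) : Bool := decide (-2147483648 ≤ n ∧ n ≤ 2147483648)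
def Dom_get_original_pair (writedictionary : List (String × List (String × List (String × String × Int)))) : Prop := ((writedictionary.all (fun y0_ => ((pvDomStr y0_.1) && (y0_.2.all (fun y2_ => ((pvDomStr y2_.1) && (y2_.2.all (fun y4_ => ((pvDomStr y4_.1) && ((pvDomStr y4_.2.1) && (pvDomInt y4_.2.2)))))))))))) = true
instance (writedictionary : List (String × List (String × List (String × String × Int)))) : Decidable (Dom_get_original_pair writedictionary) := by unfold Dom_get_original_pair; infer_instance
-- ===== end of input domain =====

-- B replaces A's overwrite-on-every-match inner loop by a helper that scans each model's
-- pair list once in reverse and returns the first qualifying pair (or None); objective: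
-- alternative decomposition, same cost.

-- ===== PORT A =====
def get_original_pair (writedictionary : List (String × List (String × List (String × String × Int)))) : List (String × String × String) :=
  let wd := PySem.Dict.ofList writedictionary
  (wd.keys.foldl (fun od model =>
      let metrics := PySem.Dict.ofList ((wd.get? model).getD [])
      match PySem.List.pyGet? metrics.keys 0 with
      | none => od   -- Python raises IndexError here (empty inner dict); excluded by Pre_
      | some myindex =>
        let mylist := (PySem.Dict.ofList (((metrics.get? myindex).getD []).map (fun e => ((e.1, e.2.1), e.2.2)))).keys
        mylist.foldl (fun od thispair =>
          let mypair := (((PySem.Str.split? thispair.1 "_").getD []), ((PySem.Str.split? thispair.2 "_").getD []))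
          if !(PySem.Str.strIsdigit (PySem.List.pyGetD mypair.2 (PySem.List.len mypair.2 - 1) "")) then
            od.insert model thispair
          else od) od)
    PySem.Dict.empty).items

-- ===== PORT B =====
-- _last_original: first pair, scanning from the end, whose second name's last '_'-part is not a digit
def pvLastOrig : List (String × String) → Option (String × String)
  | [] => none
  | p :: rest =>
    if !(PySem.Str.strIsdigit (PySem.List.pyGetD (((PySem.Str.split? p.2 "_").getD [])) (-1) "")) then some p
    else pvLastOrig rest

def get_original_pair_alt (writedictionary : List (String × List (String × List (String × String × Int)))) : List (String × String × String) :=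
  let wd := PySem.Dict.ofList writedictionary
  (wd.items.foldl (fun res mp =>
      let md := PySem.Dict.ofList mp.2
      match PySem.List.pyGet? md.keys 0 with
      | none => res   -- Python raises IndexError here; excluded by Pre_
      | some k =>
        let pairs := (PySem.Dict.ofList (((md.get? k).getD []).map (fun e => ((e.1, e.2.1), e.2.2)))).keys
        match pvLastOrig pairs.reverse with
        | none => res
        | some p => res.insert mp.1 p)
    PySem.Dict.empty).items

-- ===== PRECONDITION & SPEC =====
-- Pre_ excludes inputs with an empty inner metric dict, on which Python A raises IndexError at list(...)[0].
def Pre_get_original_pair (writedictionary : List (String × List (String × List (String × String × Int)))) : Prop :=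
  ∀ p ∈ writedictionary, p.2 ≠ []
instance (writedictionary : List (String × List (String × List (String × String × Int)))) : Decidable (Pre_get_original_pair writedictionary) := by unfold Pre_get_original_pair; infer_instance
def pvWitness_get_original_pair : (List (String × List (String × List (String × String × Int)))) :=
  [("m", [("metric", [("a", "b", 0), ("a", "orig", 1)])])]
def Spec_get_original_pair (writedictionary : List (String × List (String × List (String × String × Int)))) (out : List (String × String × String)) : Prop := out = get_original_pair_alt writedictionary
instance (writedictionary : List (String × List (String × List (String × String × Int)))) (out : List (String × String × String)) : Decidable (Spec_get_original_pair writedictionary out) := by unfold Spec_get_original_pair; infer_instance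

-- ===== CLAIM (what is proved, stated in full; the proofs are below) =====
def Claim_equal_get_original_pair : Prop := ∀ (writedictionary : List (String × List (String × List (String × String × Int)))), Dom_get_original_pair writedictionary → Pre_get_original_pair writedictionary → Spec_get_original_pair writedictionary (get_original_pair writedictionary)

-- ===== LEMMAS AND PROOFS =====

-- indexing with len-1 (A's inner test) and with -1 (B's) agree on every list
lemma pvIdx_eq (l : List String) (d : String) :
    PySem.List.pyGetD l (PySem.List.len l - 1) d = PySem.List.pyGetD l (-1) d := by
  cases l with
  | nil => rfl
  | cons x xs =>
    rw [PySem.List.pyGetD_neg_ofNat (x :: xs) 1 d (by omega) (by simp),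
        PySem.List.pyGetD_eq_getElem (x :: xs) d (by simp [PySem.List.len_eq])
          (by simp [PySem.List.len_eq])]
    congr 1
    simp [PySem.List.len_eq]

-- B's early-return reverse scan is find? on the reversed list
lemma pvLastOrig_eq_find? (l : List (String × String)) :
    pvLastOrig l = l.find? (fun p => !(PySem.Str.strIsdigit (PySem.List.pyGetD (((PySem.Str.split? p.2 "_").getD [])) (-1) ""))) := by
  induction l with
  | nil => rfl
  | cons p rest ih =>
    simp only [pvLastOrig, List.find?]
    split <;> simp_all

-- A's overwrite loop: the LAST forward match wins = the FIRST match of the reversed list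
lemma pvFoldl_insert_last (c : String × String → Bool) (model : String)
    (l : List (String × String)) (od : PySem.Dict String (String × String)) :
    l.foldl (fun od tp => if c tp then od.insert model tp else od) od
      = match l.reverse.find? c with
        | none => od
        | some p => od.insert model p := by
  induction l generalizing od with
  | nil => rfl
  | cons tp rest ih =>
    simp only [List.foldl_cons, List.reverse_cons, List.find?_append, ih]
    cases hf : rest.reverse.find? c with
    | some p => by_cases h : c tp <;> simp [h, PySem.Dict.insert_insert_self]
    | none => by_cases h : c tp <;> simp [h, List.find?]

theorem pv_main (writedictionary : List (String × List (String × List (String × String × Int)))) :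
    get_original_pair writedictionary = get_original_pair_alt writedictionary := by
  unfold get_original_pair get_original_pair_alt
  simp only []
  congr 1
  rw [show (PySem.Dict.ofList writedictionary).keys
        = (PySem.Dict.ofList writedictionary).items.map Prod.fst from rfl,
      List.foldl_map]
  apply PySem.List.foldl_congr_mem
  intro acc mp hmem
  have hget : (PySem.Dict.ofList writedictionary).get? mp.1 = some mp.2 :=
    PySem.Dict.get?_of_mem_items _ (by simpa using hmem) (PySem.Dict.nodup_keys_ofList writedictionary)
  rw [hget]
  simp only [Option.getD_some]
  cases hk : PySem.List.pyGet? (PySem.Dict.ofList mp.2).keys 0 with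
  | none => rfl
  | some myindex =>
    simp only []
    rw [pvLastOrig_eq_find?, pvFoldl_insert_last]
    have hc : (fun tp : String × String =>
        !(PySem.Str.strIsdigit (PySem.List.pyGetD ((PySem.Str.split? tp.2 "_").getD [])
            (PySem.List.len ((PySem.Str.split? tp.2 "_").getD []) - 1) "")))
      = (fun p : String × String =>
        !(PySem.Str.strIsdigit (PySem.List.pyGetD ((PySem.Str.split? p.2 "_").getD []) (-1) ""))) := by
      funext tp
      rw [pvIdx_eq]
    rw [hc]

-- ===== VERDICT (by name: the statement is the Claim_ definition above) =====
theorem get_original_pair_spec : Claim_equal_get_original_pair := by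
  intro wd _ _
  unfold Spec_get_original_pair
  exact pv_main wd
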